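-- pv_equiv track=rewrite | github.com/ama10047/Reproducbility-Challenge-SCC23 | sbc.py | sbc_basic
-- ===== SOURCE A (Python) =====
-- def sbc_base(r):
--     result = [ [None for _ in range(r)] for _ in range(r) ]
--     count = 0
--     for i in range(r):
--         for j in range(i):
--             result[i][j] = count
--             result[j][i] = count
--             count += 1
--     return result
--
-- def sbc_basic(r):
--     if r%2 != 0:
--         raise ValueError("Basic SBC requires an even value of r, not %d" % r)
--     result = sbc_base(r)
--     count = r*(r-1)//2
--     for i in range(r//2):
--         result[i][i] = count
--         result[i+r//2][i+r//2] = count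
--         count += 1
--     return result
-- ===== SOURCE B (Python) =====
-- def sbc_basic(r):
--     if r % 2 != 0:
--         raise ValueError("Basic SBC requires an even value of r, not %d" % r)
--     h = r // 2
--     base = r * (r - 1) // 2
--
--     def cell(i, j):
--         if i == j:
--             return base + i % h
--         a, b = (i, j) if i > j else (j, i)
--         return a * (a - 1) // 2 + b
--
--     return [[cell(i, j) for j in range(r)] for i in range(r)]
-- ===== Notes on version B (the rewrite author's own statement) =====
-- stated objective: simpler
-- what changed: Replaced the two mutating passes with incrementing counters (pair pass then diagonal pass) by a single comprehension that computes every cell from a closed-form index formula.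
import Mathlib
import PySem

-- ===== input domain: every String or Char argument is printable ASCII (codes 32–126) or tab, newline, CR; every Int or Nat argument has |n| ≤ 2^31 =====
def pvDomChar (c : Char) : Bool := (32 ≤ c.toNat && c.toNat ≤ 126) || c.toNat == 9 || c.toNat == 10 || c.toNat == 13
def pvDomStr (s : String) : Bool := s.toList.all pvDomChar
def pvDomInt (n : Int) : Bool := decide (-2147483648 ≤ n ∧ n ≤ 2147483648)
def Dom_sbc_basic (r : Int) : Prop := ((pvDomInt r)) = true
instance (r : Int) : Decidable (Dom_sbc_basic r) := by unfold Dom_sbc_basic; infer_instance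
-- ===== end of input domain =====

-- B replaces A's two mutating passes with incrementing counters by a single nested
-- comprehension computing every cell from a closed-form index formula (objective: simpler).

-- ===== PORT A =====
-- result[i][j] = v  (Python row mutation), exact for in-range indices (the ports only use it in range)
def pvSet2 (m : List (List Int)) (i j : Nat) (v : Int) : List (List Int) :=
  m.set i ((m.getD i []).set j v)

-- body of the inner 'for j in range(i)' loop of sbc_base
def pvInner (i : Nat) (st : List (List Int) × Int) (j : Nat) : List (List Int) × Int :=
  (pvSet2 (pvSet2 st.1 i j st.2) j i st.2, st.2 + 1)

-- body of the outer 'for i in range(r)' loop of sbc_base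
def pvOuter (st : List (List Int) × Int) (i : Nat) : List (List Int) × Int :=
  (List.range i).foldl (pvInner i) st

def sbc_base_port (r : Int) : List (List Int) :=
  let n := r.toNat   -- range(r): empty for r ≤ 0
  ((List.range n).foldl pvOuter (List.replicate n (List.replicate n 0), 0)).1

-- body of the diagonal 'for i in range(r//2)' loop of sbc_basic
def pvDiag (h : Nat) (st : List (List Int) × Int) (i : Nat) : List (List Int) × Int :=
  (pvSet2 (pvSet2 st.1 i i st.2) (i + h) (i + h) st.2, st.2 + 1)

def sbc_basic (r : Int) : List (List Int) :=
  if PySem.Int.mod r 2 ≠ 0 then []   -- Python raises ValueError here; excluded by Pre_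
  else
    let result := sbc_base_port r
    let h := (PySem.Int.floordiv r 2).toNat   -- range(r//2): empty for negative r//2
    ((List.range h).foldl (pvDiag h) (result, PySem.Int.floordiv (r * (r - 1)) 2)).1

-- ===== PORT B =====
def sbc_basic_alt (r : Int) : List (List Int) :=
  if PySem.Int.mod r 2 ≠ 0 then []   -- Python raises ValueError here; excluded by Pre_
  else
    let h := PySem.Int.floordiv r 2
    let base := PySem.Int.floordiv (r * (r - 1)) 2
    (List.range r.toNat).map (fun (i : Nat) =>
      (List.range r.toNat).map (fun (j : Nat) =>
        if i = j then base + PySem.Int.mod (i : Int) h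
        else
          let a : Int := if (i : Int) > (j : Int) then (i : Int) else (j : Int)
          let b : Int := if (i : Int) > (j : Int) then (j : Int) else (i : Int)
          PySem.Int.floordiv (a * (a - 1)) 2 + b))

-- ===== PRECONDITION & SPEC =====
-- A raises ValueError for odd r; even r (including 0 and negatives, which yield []) returns normally.
def Pre_sbc_basic (r : Int) : Prop := PySem.Int.mod r 2 = 0
instance (r : Int) : Decidable (Pre_sbc_basic r) := by unfold Pre_sbc_basic; infer_instance
def pvWitness_sbc_basic : Int := (4)

def Spec_sbc_basic (r : Int) (out : List (List Int)) : Prop := out = sbc_basic_alt r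
instance (r : Int) (out : List (List Int)) : Decidable (Spec_sbc_basic r out) := by unfold Spec_sbc_basic; infer_instance

-- ===== CLAIM (what is proved, stated in full; the proofs are below) =====
def Claim_equal_sbc_basic : Prop := ∀ (r : Int), Dom_sbc_basic r → Pre_sbc_basic r → Spec_sbc_basic r (sbc_basic r)

-- ===== LEMMAS AND PROOFS =====

-- canonical n×n matrix given by an entry function
def matF (n : Nat) (F : Nat → Nat → Int) : List (List Int) :=
  (List.range n).map (fun i => (List.range n).map (fun j => F i j))

-- triangular numbers
def T : Nat → Nat
  | 0 => 0
  | k + 1 => T k + k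

lemma matF_congr {n : Nat} {F G : Nat → Nat → Int}
    (h : ∀ a b, a < n → b < n → F a b = G a b) : matF n F = matF n G := by
  unfold matF
  apply List.map_congr_left
  intro a ha
  apply List.map_congr_left
  intro b hb
  exact h a b (List.mem_range.mp ha) (List.mem_range.mp hb)

lemma set_map_range {α : Type} (n j : Nat) (g : Nat → α) (v : α) (_hj : j < n) :
    ((List.range n).map g).set j v = (List.range n).map (fun b => if b = j then v else g b) := by
  apply List.ext_getElem
  · simp
  · intro k h1 h2
    simp only [List.getElem_set, List.getElem_map, List.getElem_range]
    split_ifs with h3 h4 h4 <;> first | rfl | omega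

lemma getD_map_range {α : Type} (n i : Nat) (g : Nat → α) (d : α) (hi : i < n) :
    ((List.range n).map g).getD i d = g i := by
  rw [List.getD_eq_getElem _ _ (by simpa using hi)]
  simp

lemma pvSet2_mat (n i j : Nat) (F : Nat → Nat → Int) (v : Int) (hi : i < n) (hj : j < n) :
    pvSet2 (matF n F) i j v = matF n (fun a b => if a = i ∧ b = j then v else F a b) := by
  unfold pvSet2 matF
  rw [getD_map_range n i _ [] hi, set_map_range n j _ v hj, set_map_range n i _ _ hi]
  apply List.map_congr_left
  intro a _
  by_cases ha : a = i
  · subst ha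
    rw [if_pos rfl]
    apply List.map_congr_left
    intro b _
    by_cases hb : b = j <;> simp [hb]
  · simp only [if_neg ha]
    apply List.map_congr_left
    intro b _
    simp [ha]

lemma row_fold (n i : Nat) (hi : i < n) (F : Nat → Nat → Int) (c : Int) (t : Nat) (ht : t ≤ i) :
    (List.range t).foldl (pvInner i) (matF n F, c) =
      (matF n (fun a b =>
        if a = i ∧ b < t then c + b else if b = i ∧ a < t then c + a else F a b),
       c + t) := by
  induction t with
  | zero =>
    simp only [List.range_zero, List.foldl_nil]
    refine Prod.ext ?_ (by simp)
    apply matF_congr; intro a b _ _; simp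
  | succ t ih =>
    rw [List.range_succ, List.foldl_append, ih (by omega)]
    simp only [List.foldl_cons, List.foldl_nil, pvInner]
    rw [pvSet2_mat n i t _ _ hi (by omega), pvSet2_mat n t i _ _ (by omega) hi]
    refine Prod.ext ?_ (by push_cast; ring)
    apply matF_congr; intro a b _ _
    by_cases h1 : a = t ∧ b = i
    · obtain ⟨rfl, rfl⟩ := h1
      rw [if_pos ⟨rfl, rfl⟩, if_neg (by omega), if_pos ⟨rfl, by omega⟩]
    · rw [if_neg h1]
      by_cases h2 : a = i ∧ b = t
      · obtain ⟨rfl, rfl⟩ := h2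
        rw [if_pos ⟨rfl, rfl⟩, if_pos ⟨rfl, by omega⟩]
      · rw [if_neg h2]
        by_cases h3 : a = i ∧ b < t
        · rw [if_pos h3, if_pos ⟨h3.1, by omega⟩]
        · rw [if_neg h3]
          by_cases h4 : b = i ∧ a < t
          · rw [if_pos h4, if_neg (by omega), if_pos ⟨h4.1, by omega⟩]
          · rw [if_neg h4, if_neg (by omega), if_neg (by omega)]

-- the entry function of sbc_base's result after the first t rows
def Fbase (t : Nat) : Nat → Nat → Int := fun a b =>
  if a ≠ b ∧ max a b < t then ((T (max a b) : Nat) : Int) + ((min a b : Nat) : Int) else 0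

lemma outer_fold (n t : Nat) (ht : t ≤ n) :
    (List.range t).foldl pvOuter (matF n (fun _ _ => 0), 0) = (matF n (Fbase t), ((T t : Nat) : Int)) := by
  induction t with
  | zero =>
    simp only [List.range_zero, List.foldl_nil, T, Nat.cast_zero]
    refine Prod.ext ?_ rfl
    apply matF_congr; intro a b _ _; simp [Fbase]
  | succ t ih =>
    rw [List.range_succ, List.foldl_append, ih (by omega)]
    simp only [List.foldl_cons, List.foldl_nil, pvOuter]
    rw [row_fold n t (by omega) _ _ t le_rfl]
    refine Prod.ext ?_ (by simp only [T]; push_cast; ring)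
    apply matF_congr; intro a b _ _
    unfold Fbase
    by_cases h1 : a = t ∧ b < t
    · obtain ⟨rfl, hb⟩ := h1
      rw [if_pos ⟨rfl, hb⟩, if_pos ⟨by omega, by omega⟩]
      have hm : max a b = a := by omega
      have hmn : min a b = b := by omega
      rw [hm, hmn]
    · rw [if_neg h1]
      by_cases h2 : b = t ∧ a < t
      · obtain ⟨rfl, hb⟩ := h2
        rw [if_pos ⟨rfl, hb⟩, if_pos ⟨by omega, by omega⟩]
        have hm : max a b = b := by omega
        have hmn : min a b = a := by omega
        rw [hm, hmn]
      · rw [if_neg h2]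
        by_cases h3 : a ≠ b ∧ max a b < t
        · rw [if_pos h3, if_pos ⟨h3.1, by omega⟩]
        · rw [if_neg h3, if_neg (by omega)]

lemma diag_fold (n h : Nat) (hn : n = h + h) (F : Nat → Nat → Int) (c : Int) (t : Nat) (ht : t ≤ h) :
    (List.range t).foldl (pvDiag h) (matF n F, c) =
      (matF n (fun a b =>
        if a = b ∧ a < t then c + a
        else if a = b ∧ h ≤ a ∧ a < h + t then c + ((a - h : Nat) : Int)
        else F a b),
       c + t) := by
  induction t with
  | zero =>
    simp only [List.range_zero, List.foldl_nil]
    refine Prod.ext ?_ (by simp)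
    apply matF_congr; intro a b _ _; simp
  | succ t ih =>
    rw [List.range_succ, List.foldl_append, ih (by omega)]
    simp only [List.foldl_cons, List.foldl_nil, pvDiag]
    rw [pvSet2_mat n t t _ _ (by omega) (by omega),
        pvSet2_mat n (t + h) (t + h) _ _ (by omega) (by omega)]
    refine Prod.ext ?_ (by push_cast; ring)
    apply matF_congr; intro a b _ _
    by_cases h1 : a = t + h ∧ b = t + h
    · obtain ⟨rfl, rfl⟩ := h1
      rw [if_pos ⟨rfl, rfl⟩, if_neg (by omega), if_pos ⟨rfl, by omega, by omega⟩]
      have ht' : t + h - h = t := by omega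
      rw [ht']
    · rw [if_neg h1]
      by_cases h2 : a = t ∧ b = t
      · obtain ⟨rfl, rfl⟩ := h2
        rw [if_pos ⟨rfl, rfl⟩, if_pos ⟨rfl, by omega⟩]
      · rw [if_neg h2]
        by_cases h3 : a = b ∧ a < t
        · rw [if_pos h3, if_pos ⟨h3.1, by omega⟩]
        · rw [if_neg h3]
          by_cases h4 : a = b ∧ h ≤ a ∧ a < h + t
          · rw [if_pos h4, if_neg (by omega), if_pos ⟨h4.1, by omega, by omega⟩]
          · rw [if_neg h4, if_neg (by omega), if_neg (by omega)]

lemma two_T (k : Nat) : 2 * T k = k * (k - 1) := by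
  induction k with
  | zero => rfl
  | succ k ih =>
    have e : (k + 1) * ((k + 1) - 1) = k * (k - 1) + 2 * k := by
      cases k with
      | zero => rfl
      | succ m => simp only [Nat.add_sub_cancel]; ring
    simp only [T, e]
    omega

lemma fd2 (k : Nat) : PySem.Int.floordiv (k : Int) 2 = ((k / 2 : Nat) : Int) := by
  exact_mod_cast PySem.Int.floordiv_natCast k 2

lemma castT (m : Nat) : PySem.Int.floordiv ((m : Int) * ((m : Int) - 1)) 2 = ((T m : Nat) : Int) := by
  cases m with
  | zero => decide
  | succ k =>
    have h1 : ((k + 1 : Nat) : Int) * (((k + 1 : Nat) : Int) - 1) = (((k + 1) * k : Nat) : Int) := by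
      push_cast; ring
    rw [h1, fd2]
    have h2 : 2 * T (k + 1) = (k + 1) * ((k + 1) - 1) := two_T (k + 1)
    simp only [Nat.add_sub_cancel] at h2
    congr 1
    omega

-- ===== VERDICT (by name: the statement is the Claim_ definition above) =====
theorem sbc_basic_spec : Claim_equal_sbc_basic := by
  intro r _ hpre
  unfold Pre_sbc_basic at hpre
  unfold Spec_sbc_basic sbc_basic sbc_basic_alt
  rw [if_neg (not_not_intro hpre), if_neg (not_not_intro hpre)]
  by_cases hr : 0 ≤ r
  · lift r to ℕ using hr with n
    have hmod : n % 2 = 0 := by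
      rw [PySem.Int.mod_eq_emod_of_pos (by omega)] at hpre
      omega
    set h := n / 2 with hh
    have hfd : PySem.Int.floordiv (n : Int) 2 = (h : Int) := by rw [fd2]
    have hc0 : PySem.Int.floordiv ((n : Int) * ((n : Int) - 1)) 2 = ((T n : Nat) : Int) := castT n
    have hrepl : List.replicate n (List.replicate n (0 : Int)) = matF n (fun _ _ => 0) := by
      simp [matF, List.map_const']
    have hb : sbc_base_port (n : Int) = matF n (Fbase n) := by
      unfold sbc_base_port
      simp only [Int.toNat_natCast]
      rw [hrepl, outer_fold n n le_rfl]
    simp only [Int.toNat_natCast, hb, hfd, hc0]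
    rw [diag_fold n h (by omega) (Fbase n) _ h le_rfl]
    apply matF_congr
    intro a b ha hb2
    by_cases hab : a = b
    · subst hab
      rw [if_pos rfl]
      rw [PySem.Int.mod_natCast a h]
      by_cases hah : a < h
      · rw [if_pos ⟨rfl, hah⟩, Nat.mod_eq_of_lt hah]
      · rw [if_neg (by omega), if_pos ⟨rfl, by omega, by omega⟩]
        rw [Nat.mod_eq_sub_mod (by omega), Nat.mod_eq_of_lt (by omega)]
    · rw [if_neg hab, if_neg (by omega), if_neg (by omega)]
      unfold Fbase
      rw [if_pos ⟨hab, by omega⟩]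
      by_cases hgt : b < a
      · have hcast : ((a : Nat) : Int) > ((b : Nat) : Int) := by exact_mod_cast hgt
        simp only [if_pos hcast]
        rw [castT a]
        have h1 : max a b = a := by omega
        have h2 : min a b = b := by omega
        rw [h1, h2]
      · have hcast : ¬ ((a : Nat) : Int) > ((b : Nat) : Int) := by
          simp only [gt_iff_lt, not_lt]
          exact_mod_cast Nat.le_of_not_lt hgt
        simp only [if_neg hcast]
        rw [castT b]
        have h1 : max a b = b := by omega
        have h2 : min a b = a := by omega
        rw [h1, h2]
  · have h0 : r.toNat = 0 := by omega
    have hfd0 : (PySem.Int.floordiv r 2).toNat = 0 := by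
      rw [PySem.Int.floordiv_eq_ediv_of_pos (by omega : (0:Int) < 2)]
      omega
    unfold sbc_base_port
    rw [hfd0]
    simp [h0]
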